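-- pv_equiv track=rewrite | github.com/ishandutta2007/challenges | dailyprogrammer/215-easy-sad-cycles.py | sadcycle
-- ===== SOURCE A (Python) =====
-- def sadsum(b, n):
--     r = 0
--     while n != 0:
--         r += (n % 10)**b
--         n //= 10
--     return r
--
-- def sadcycle(b, n):
--     r = []
--     m = { n: True }
--     while True:
--         r.append(n)
--         n = sadsum(b, n)
--         if n in m:
--             break
--         m[n] = True
--     i = r.index(n)
--     r = r[i:]
--     return r
-- ===== SOURCE B (Python) =====
-- def sadsum(b, n):
--     r = 0
--     while n != 0:
--         r += (n % 10)**b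
--         n //= 10
--     return r
--
-- def sadcycle(b, n):
--     # Detect the first repeated value with a plain seen-set (no trajectory list),
--     # then rebuild the cycle by re-iterating from that value until it recurs.
--     seen = {n}
--     while True:
--         n = sadsum(b, n)
--         if n in seen:
--             break
--         seen.add(n)
--     cycle = [n]
--     x = sadsum(b, n)
--     while x != n:
--         cycle.append(x)
--         x = sadsum(b, x)
--     return cycle
-- ===== Notes on version B (the rewrite author's own statement) =====
-- stated objective: alternative
-- what changed: A records the whole trajectory in a list and, at the first repeated value, rescans that list with list.index and slices; B keeps only a seen-set to detect the first repeated value and then rebuilds the cycle by re-iterating sadsum from that value until it recurs, so no trajectory list, no index scan and no slicing.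
import Mathlib
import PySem

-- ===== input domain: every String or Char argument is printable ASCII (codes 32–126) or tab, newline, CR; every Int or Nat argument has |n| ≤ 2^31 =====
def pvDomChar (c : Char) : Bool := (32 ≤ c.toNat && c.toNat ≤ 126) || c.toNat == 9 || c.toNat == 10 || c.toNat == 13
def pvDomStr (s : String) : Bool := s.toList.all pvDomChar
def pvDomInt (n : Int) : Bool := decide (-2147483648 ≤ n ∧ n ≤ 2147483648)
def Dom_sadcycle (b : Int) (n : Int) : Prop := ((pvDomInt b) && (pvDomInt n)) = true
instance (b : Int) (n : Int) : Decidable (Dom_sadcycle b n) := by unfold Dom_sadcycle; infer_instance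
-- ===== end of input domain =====

-- B replaces A's recorded trajectory list + first-index slice by a seen-set-only detection loop
-- followed by a second loop that regenerates the cycle from the first repeated value (objective: alternative).
-- Both while-loops are ported with an explicit fuel bound large enough for every terminating run
-- (fuel exhaustion is unreachable for inputs satisfying Pre_; both ports return [] there).

-- ===== PORT A =====
-- helper sadsum (identical in Source A and Source B): r = 0; while n != 0: r += (n % 10)**b; n //= 10
-- exponent ** b ported as ^ b.toNat (exact for 0 ≤ b, i.e. under Pre_; for b < 0 Python returns floats).
-- The n < 0 case loops forever in Python (n //= 10 stalls at -1): the port stops there (outside Pre_).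
def sadsumGo (b : Int) (n : Int) (r : Int) : Int :=
  if _h : 0 < n then
    sadsumGo b (PySem.Int.floordiv n 10) (r + (PySem.Int.mod n 10) ^ b.toNat)
  else r
termination_by n.toNat
decreasing_by
  rw [PySem.Int.floordiv_eq_ediv_of_pos (by omega : (0:Int) < 10)]
  omega

def sadsum (b : Int) (n : Int) : Int := sadsumGo b n 0

-- fuel for the while-True loop: an iteration count no terminating run of A (0 ≤ b, 0 ≤ n) can reach,
-- since every value in the trajectory stays ≤ max n ((b+1)·9^b) and values never repeat before the break
def sadcycleFuel (b : Int) (n : Int) : Nat := n.toNat + (b.toNat + 1) * 9 ^ b.toNat + 2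

-- i = r.index(n); r = r[i:]; return r   (ValueError branch is unreachable: n is a dict key, hence in r)
def sadcycleIndexSlice (r : List Int) (n : Int) : List Int :=
  match PySem.List.index? r n with
  | some i => PySem.List.slice r (some (i : Int)) none
  | none => []

def sadcycleGo (b : Int) : Nat → List Int → PySem.Dict Int Bool → Int → List Int
  | 0, _, _, _ => []
  | fuel + 1, r, m, n =>
    let r' := r ++ [n]
    let n' := sadsum b n
    if PySem.Dict.contains m n' then sadcycleIndexSlice r' n'
    else sadcycleGo b fuel r' (PySem.Dict.insert m n' true) n'

def sadcycle (b : Int) (n : Int) : List Int :=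
  sadcycleGo b (sadcycleFuel b n) [] (PySem.Dict.ofList [(n, true)]) n

-- ===== PORT B =====
-- detection loop: seen = {n}; while True: n = sadsum(b, n); if n in seen: break; seen.add(n)
def sadcycleDetect (b : Int) : Nat → PySem.Set Int → Int → Option Int
  | 0, _, _ => none
  | fuel + 1, seen, n =>
    let n' := sadsum b n
    if PySem.Set.contains seen n' then some n'
    else sadcycleDetect b fuel (PySem.Set.add seen n') n'

-- regeneration loop: cycle = [n]; x = sadsum(b, n); while x != n: cycle.append(x); x = sadsum(b, x)
def sadcycleCollect (b : Int) (v : Int) : Nat → Int → List Int → List Int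
  | 0, _, acc => acc
  | fuel + 1, x, acc =>
    if x = v then acc
    else sadcycleCollect b v fuel (sadsum b x) (acc ++ [x])

def sadcycle_alt (b : Int) (n : Int) : List Int :=
  match sadcycleDetect b (sadcycleFuel b n) (PySem.Set.ofList [n]) n with
  | none => []
  | some v => sadcycleCollect b v (sadcycleFuel b n) (sadsum b v) [v]

-- ===== PRECONDITION & SPEC =====
-- Pre_ excludes b < 0 (Python A returns a list of floats, not ints) and n < 0 (Python A's sadsum
-- loops forever there: n //= 10 stalls at -1).
def Pre_sadcycle (b : Int) (n : Int) : Prop := 0 ≤ b ∧ 0 ≤ n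
instance (b : Int) (n : Int) : Decidable (Pre_sadcycle b n) := by unfold Pre_sadcycle; infer_instance
def pvWitness_sadcycle : Int × Int := (2, 7)

def Spec_sadcycle (b : Int) (n : Int) (out : List Int) : Prop := out = sadcycle_alt b n
instance (b : Int) (n : Int) (out : List Int) : Decidable (Spec_sadcycle b n out) := by unfold Spec_sadcycle; infer_instance

-- ===== CLAIM (what is proved, stated in full; the proofs are below) =====
def Claim_equal_sadcycle : Prop := ∀ (b : Int) (n : Int), Dom_sadcycle b n → Pre_sadcycle b n → Spec_sadcycle b n (sadcycle b n)

-- ===== LEMMAS AND PROOFS =====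

-- the step relation of the iteration, and a common reference description of the detection phase:
-- pvWalk returns (the values appended to A's r before the break, the first repeated value)
def pvStep (b : Int) (x y : Int) : Prop := y = sadsum b x

def pvWalk (b : Int) : Nat → List Int → Int → Option (List Int × Int)
  | 0, _, _ => none
  | fuel + 1, seen, n =>
    let n' := sadsum b n
    if PySem.Set.contains seen n' then some ([n], n')
    else (pvWalk b fuel (PySem.Set.add seen n') n').map (fun p => (n :: p.1, p.2))

theorem detect_eq_walk (b : Int) : ∀ (fuel : Nat) (seen : List Int) (n : Int),
    sadcycleDetect b fuel seen n = (pvWalk b fuel seen n).map (·.2) := by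
  intro fuel
  induction fuel with
  | zero => intro seen n; rfl
  | succ f ih =>
    intro seen n
    simp only [sadcycleDetect, pvWalk]
    by_cases h : sadsum b n ∈ seen
    · simp [h]
    · simp [h, ih, Option.map_map, Function.comp_def]

theorem go_eq_walk (b : Int) : ∀ (fuel : Nat) (r : List Int) (m : PySem.Dict Int Bool) (n : Int),
    (∀ x : Int, PySem.Dict.contains m x = PySem.Set.contains (r ++ [n]) x) →
    sadcycleGo b fuel r m n =
      match pvWalk b fuel (r ++ [n]) n with
      | none => []
      | some (p, v) => sadcycleIndexSlice (r ++ p) v := by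
  intro fuel
  induction fuel with
  | zero => intro r m n hm; rfl
  | succ f ih =>
    intro r m n hm
    have hn' : PySem.Dict.contains m (sadsum b n) = PySem.Set.contains (r ++ [n]) (sadsum b n) := hm _
    by_cases h : sadsum b n ∈ r ++ [n]
    · have hc : PySem.Dict.contains m (sadsum b n) = true := by
        rw [hn']; simpa [PySem.Set.contains] using h
      simp only [sadcycleGo, pvWalk, hc, if_true]
      simp [h]
    · have hc : PySem.Dict.contains m (sadsum b n) = false := by
        rw [hn']; simpa [PySem.Set.contains] using h
      have hadd : PySem.Set.add (r ++ [n]) (sadsum b n) = (r ++ [n]) ++ [sadsum b n] := by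
        simp [PySem.Set.add, PySem.Set.contains, h]
      have hm' : ∀ x : Int, PySem.Dict.contains (PySem.Dict.insert m (sadsum b n) true) x
          = PySem.Set.contains ((r ++ [n]) ++ [sadsum b n]) x := by
        intro x
        rw [PySem.Dict.contains_insert, hm]
        by_cases hx : x = sadsum b n <;> by_cases hx2 : x ∈ r ++ [n] <;>
          simp_all [PySem.Set.contains]
      have h2 : ¬(sadsum b n ∈ r ∨ sadsum b n = n) := by simpa using h
      simp only [sadcycleGo, pvWalk, hc, Bool.false_eq_true, if_false]
      rw [ih (r ++ [n]) _ (sadsum b n) hm']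
      rw [hadd]
      cases hw : pvWalk b f ((r ++ [n]) ++ [sadsum b n]) (sadsum b n) with
      | none => simp [h2]
      | some pv => cases pv with | mk p v => simp [h2]

theorem walk_spec (b : Int) : ∀ (fuel : Nat) (pre : List Int) (n : Int) (p : List Int) (v : Int),
    List.IsChain (pvStep b) (pre ++ [n]) → (pre ++ [n]).Nodup →
    pvWalk b fuel (pre ++ [n]) n = some (p, v) →
    (pre ++ p).Nodup ∧ List.IsChain (pvStep b) (pre ++ p) ∧ v ∈ pre ++ p ∧
      (∃ h : pre ++ p ≠ [], sadsum b ((pre ++ p).getLast h) = v) ∧ p.length ≤ fuel := by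
  intro fuel
  induction fuel with
  | zero => intro pre n p v _ _ h; exact absurd h (by simp [pvWalk])
  | succ f ih =>
    intro pre n p v hch hnd hw
    simp only [pvWalk] at hw
    by_cases h : sadsum b n ∈ pre ++ [n]
    · rw [if_pos (by simpa [PySem.Set.contains] using h)] at hw
      have hinj := Option.some.inj hw
      rw [Prod.mk.injEq] at hinj
      obtain ⟨hp, hv⟩ := hinj
      subst hp hv
      refine ⟨hnd, hch, h, ⟨by simp, ?_⟩, by simp⟩
      rw [List.getLast_concat]
    · rw [if_neg (by simpa [PySem.Set.contains] using h)] at hw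
      have hadd : PySem.Set.add (pre ++ [n]) (sadsum b n) = (pre ++ [n]) ++ [sadsum b n] := by
        simp [PySem.Set.add, PySem.Set.contains, h]
      rw [hadd] at hw
      rcases Option.map_eq_some_iff.mp hw with ⟨⟨p', v'⟩, hw', hpv⟩
      rw [Prod.mk.injEq] at hpv
      obtain ⟨hp, hv⟩ := hpv
      subst hp hv
      have hch' : List.IsChain (pvStep b) ((pre ++ [n]) ++ [sadsum b n]) := by
        refine hch.append (List.isChain_singleton _) ?_
        intro x hx y hy
        simp only [List.getLast?_concat, Option.mem_def, Option.some.injEq] at hx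
        simp only [List.head?_cons, Option.mem_def, Option.some.injEq] at hy
        subst hx hy; rfl
      have hnd' : ((pre ++ [n]) ++ [sadsum b n]).Nodup := by
        rw [List.nodup_append]
        refine ⟨hnd, List.nodup_singleton _, ?_⟩
        intro a ha c hc
        simp only [List.mem_singleton] at hc
        subst hc
        exact fun e => h (e ▸ ha)
      obtain ⟨c1, c2, c3, c4, c5⟩ := ih (pre ++ [n]) (sadsum b n) p' _ hch' hnd' hw'
      rw [← List.append_cons] at c1 c2 c3 c4
      exact ⟨c1, c2, c3, c4, by simpa using Nat.succ_le_succ c5⟩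

theorem collect_seg (b v : Int) : ∀ (t : List Int) (fuel : Nat) (x : Int) (acc : List Int),
    List.IsChain (pvStep b) (x :: t) →
    sadsum b ((x :: t).getLast (by simp)) = v →
    v ∉ x :: t → t.length < fuel →
    sadcycleCollect b v fuel x acc = acc ++ x :: t := by
  intro t
  induction t with
  | nil =>
    intro fuel x acc hch hlast hv hf
    cases fuel with
    | zero => exact absurd hf (by simp)
    | succ f =>
      have hxv : x ≠ v := fun e => hv (by simp [e])
      simp only [sadcycleCollect, if_neg hxv]
      have hx : sadsum b x = v := by simpa using hlast
      rw [hx]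
      cases f with
      | zero => rfl
      | succ f' => simp [sadcycleCollect]
  | cons y t ih =>
    intro fuel x acc hch hlast hv hf
    cases fuel with
    | zero => exact absurd hf (by simp)
    | succ f =>
      have hxy : y = sadsum b x := (List.isChain_cons_cons.mp hch).1
      have hxv : x ≠ v := fun e => hv (by simp [e])
      simp only [sadcycleCollect, if_neg hxv]
      rw [← hxy]
      rw [ih f y (acc ++ [x]) (List.isChain_cons_cons.mp hch).2
          (by rwa [List.getLast_cons (by simp)] at hlast)
          (fun hm => hv (List.mem_cons_of_mem _ hm))
          (Nat.lt_of_succ_lt_succ (by simpa using hf))]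
      simp
  

theorem collect_cycle (b v : Int) (u t : List Int) (fuel : Nat)
    (hch : List.IsChain (pvStep b) (u ++ v :: t)) (hnd : (u ++ v :: t).Nodup)
    (hlast : sadsum b ((u ++ v :: t).getLast (by simp)) = v) (hf : t.length < fuel) :
    sadcycleCollect b v fuel (sadsum b v) [v] = v :: t := by
  have hchvt : List.IsChain (pvStep b) (v :: t) := (List.isChain_append.mp hch).2.1
  have hndvt : (v :: t).Nodup := hnd.of_append_right
  have hlast' : sadsum b ((v :: t).getLast (by simp)) = v := by
    have hgl : (u ++ v :: t).getLast (by simp) = (v :: t).getLast (by simp) := by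
      rw [List.getLast_append]; simp
    rw [hgl] at hlast
    exact hlast
  cases t with
  | nil =>
    have hv : sadsum b v = v := by simpa using hlast'
    rw [hv]
    cases fuel with
    | zero => rfl
    | succ f => simp [sadcycleCollect]
  | cons w t' =>
    have hwv : w = sadsum b v := (List.isChain_cons_cons.mp hchvt).1
    have hlast2 : sadsum b ((w :: t').getLast (by simp)) = v := by
      rwa [List.getLast_cons (by simp)] at hlast'
    have hvm : v ∉ w :: t' := by
      simp only [List.nodup_cons] at hndvt
      exact hndvt.1
    have hs := collect_seg b v t' fuel w [v] (List.isChain_cons_cons.mp hchvt).2 hlast2 hvm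
        (Nat.lt_of_succ_lt (by simpa using hf))
    rw [← hwv]
    exact hs

-- ===== VERDICT (by name: the statement is the Claim_ definition above) =====
theorem sadcycle_spec : Claim_equal_sadcycle := by
  unfold Claim_equal_sadcycle
  intro b n _hdom _hpre
  unfold Spec_sadcycle sadcycle sadcycle_alt
  have hm0 : ∀ x : Int, PySem.Dict.contains (PySem.Dict.ofList [(n, true)]) x
      = PySem.Set.contains (([] : List Int) ++ [n]) x := by
    intro x
    simp [PySem.Dict.ofList, PySem.Dict.update, PySem.Dict.contains_insert, PySem.Set.contains]
    by_cases hx : x = n <;> simp [hx]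
  rw [go_eq_walk b _ [] _ n hm0]
  rw [detect_eq_walk]
  have hofl : PySem.Set.ofList [n] = ([] : List Int) ++ [n] := rfl
  rw [hofl]
  cases hw : pvWalk b (sadcycleFuel b n) (([] : List Int) ++ [n]) n with
  | none => simp
  | some pv =>
    obtain ⟨p, v⟩ := pv
    obtain ⟨c1, c2, c3, c4, c5⟩ := walk_spec b _ [] n p v
      (by simp) (by simp) hw
    simp only [List.nil_append] at c1 c2 c3 c4
    cases hidx : PySem.List.index? p v with
    | none => exact absurd c3 ((PySem.List.index?_eq_none_iff p v).mp hidx)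
    | some i =>
      obtain ⟨u, t, hput, hlen, hvu⟩ := (PySem.List.index?_eq_some_iff p v i).mp hidx
      have hA : sadcycleIndexSlice (([] : List Int) ++ p) v = v :: t := by
        simp only [List.nil_append, sadcycleIndexSlice, hidx]
        rw [← hlen, hput, PySem.List.slice_from_natCast, List.drop_left]
      have ht : t.length < sadcycleFuel b n := by
        have hpl : p.length = u.length + (t.length + 1) := by rw [hput]; simp
        omega
      rw [hput] at c1 c2 c4
      obtain ⟨hne, hl⟩ := c4
      have hB : sadcycleCollect b v (sadcycleFuel b n) (sadsum b v) [v] = v :: t :=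
        collect_cycle b v u t _ c2 c1 hl ht
      simp only [Option.map_some]
      rw [hA, hB]
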